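-- pv_equiv track=rewrite | github.com/HPhuonghub/Python-Code-Ptit | PY01041    SỐ TĂNG GIẢM.py | check
-- ===== SOURCE A (Python) =====
-- def check(n):
--     if len(n)<2: return 0
--     max = 0
--     vitri = 0
--     for i in range(len(n)):
--         if max < int(n[i]):
--             max = int(n[i])
--             vitri = i
--     for i in range(vitri):
--         if n[i] < n[i+1]: continue
--         else: return 0
--     for i in range(vitri,len(n)-1):
--         if n[i] > n[i+1]: continue
--         else: return 0
--     return 1
-- ===== SOURCE B (Python) =====
-- def _walk(d, i, cmp):
--     while i + 1 < len(d) and cmp(d[i], d[i + 1]):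
--         i += 1
--     return i
--
--
-- def check(n):
--     if len(n) < 2:
--         return 0
--     d = [int(c) for c in n]
--     i = _walk(d, 0, lambda x, y: x < y)
--     i = _walk(d, i, lambda x, y: x > y)
--     return 1 if i == len(d) - 1 else 0
-- ===== Notes on version B (the rewrite author's own statement) =====
-- stated objective: simpler
-- what changed: Replaces A's three loops (find the first maximum's position, then verify strict increase before it and strict decrease after it) by a single two-phase pointer walk: advance while strictly rising, then while strictly falling, and return 1 iff the walk reaches the last index.
import Mathlib
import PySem

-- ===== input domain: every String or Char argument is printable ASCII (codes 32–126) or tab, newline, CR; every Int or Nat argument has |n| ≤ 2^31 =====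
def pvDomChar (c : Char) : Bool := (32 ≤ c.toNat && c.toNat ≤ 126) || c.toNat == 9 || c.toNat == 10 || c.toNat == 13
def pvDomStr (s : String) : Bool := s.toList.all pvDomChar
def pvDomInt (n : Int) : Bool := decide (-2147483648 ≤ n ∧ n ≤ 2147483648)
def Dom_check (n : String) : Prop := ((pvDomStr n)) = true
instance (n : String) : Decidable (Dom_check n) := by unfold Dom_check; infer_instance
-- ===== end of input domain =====

-- B replaces A's argmax-then-two-verification-loops by a single two-phase rise/fall walk (simpler decomposition, same O(n)).


-- ===== PORT A =====
-- int(n[i]) on a one-character string; none (ValueError, non-digit char) is excluded by Pre_check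
def pvIntChar (c : Char) : Int := (PySem.Int.ofChars? [c]).getD 0

-- A's first loop: running maximum (starting at 0) with the index of its first strict improvement
def pvMaxLoop (cs : List Char) : Int × Nat :=
  (List.range cs.length).foldl
    (fun mv i => if mv.1 < pvIntChar (cs.getD i ' ') then (pvIntChar (cs.getD i ' '), i) else mv)
    (0, 0)

def check (n : String) : Int :=
  let cs := n.toList
  if cs.length < 2 then 0
  else
    let vitri := (pvMaxLoop cs).2
    -- second loop: early return 0 unless n[i] < n[i+1] for all i in range(vitri)
    if (List.range vitri).all (fun i => decide (cs.getD i ' ' < cs.getD (i + 1) ' ')) then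
      -- third loop: early return 0 unless n[i] > n[i+1] for all i in range(vitri, len(n)-1)
      if (List.range' vitri (cs.length - 1 - vitri)).all
          (fun i => decide (cs.getD (i + 1) ' ' < cs.getD i ' ')) then 1
      else 0
    else 0

-- ===== PORT B =====
-- Source B's _walk: advance i while i+1 < len(d) and cmp(d[i], d[i+1])
def pvWalk (d : List Int) (i : Nat) (cmp : Int → Int → Bool) : Nat :=
  if i + 1 < d.length then
    if cmp (d.getD i 0) (d.getD (i + 1) 0) then pvWalk d (i + 1) cmp else i
  else i
termination_by d.length - i

def check_alt (n : String) : Int :=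
  let cs := n.toList
  if cs.length < 2 then 0
  else
    let d := cs.map pvIntChar
    let i1 := pvWalk d 0 (fun x y => decide (x < y))
    let i2 := pvWalk d i1 (fun x y => decide (y < x))
    if i2 = d.length - 1 then 1 else 0

-- ===== PRECONDITION & SPEC =====
-- Pre_check excludes exactly the inputs where the Python A raises ValueError:
-- strings of length ≥ 2 containing a non-digit character (int(n[i]) fails there; B raises too).
def Pre_check (n : String) : Prop :=
  n.toList.length < 2 ∨ n.toList.all PySem.Chars.isdigit = true
instance (n : String) : Decidable (Pre_check n) := by unfold Pre_check; infer_instance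

def pvWitness_check : String := "1210"

def Spec_check (n : String) (out : Int) : Prop := out = check_alt n
instance (n : String) (out : Int) : Decidable (Spec_check n out) := by unfold Spec_check; infer_instance

-- ===== CLAIM (what is proved, stated in full; the proofs are below) =====
def Claim_equal_check : Prop := ∀ (n : String), Dom_check n → Pre_check n → Spec_check n (check n)

-- ===== LEMMAS AND PROOFS =====

-- digit-char value of int(c)
theorem ofChars_digit (c : Char) (h : PySem.Chars.isdigit c = true) :
    PySem.Int.ofChars? [c] = some ((c.toNat : Int) - 48) := by
  simp only [PySem.Chars.isdigit, Bool.and_eq_true, decide_eq_true_eq] at h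
  obtain ⟨h1, h2⟩ := h
  have h1' : 48 ≤ c.toNat := h1
  have h2' : c.toNat ≤ 57 := h2
  have key : ∀ d : Char, c.toNat = d.toNat → c = d := fun d hd => Char.ext (UInt32.toNat_inj.mp hd)
  interval_cases hn : c.toNat <;>
    first
    | (rw [key '0' (by decide)]; decide)
    | (rw [key '1' (by decide)]; decide)
    | (rw [key '2' (by decide)]; decide)
    | (rw [key '3' (by decide)]; decide)
    | (rw [key '4' (by decide)]; decide)
    | (rw [key '5' (by decide)]; decide)
    | (rw [key '6' (by decide)]; decide)
    | (rw [key '7' (by decide)]; decide)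
    | (rw [key '8' (by decide)]; decide)
    | (rw [key '9' (by decide)]; decide)

theorem pvIntChar_digit (c : Char) (h : PySem.Chars.isdigit c = true) :
    pvIntChar c = (c.toNat : Int) - 48 := by
  simp [pvIntChar, ofChars_digit c h]

theorem pvIntChar_nonneg (c : Char) (h : PySem.Chars.isdigit c = true) : 0 ≤ pvIntChar c := by
  rw [pvIntChar_digit c h]
  have : 48 ≤ c.toNat := by
    simp only [PySem.Chars.isdigit, Bool.and_eq_true, decide_eq_true_eq] at h
    exact h.1
  omega

theorem char_lt_iff (c d : Char) (hc : PySem.Chars.isdigit c = true)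
    (hd : PySem.Chars.isdigit d = true) : c < d ↔ pvIntChar c < pvIntChar d := by
  rw [pvIntChar_digit c hc, pvIntChar_digit d hd]
  constructor <;> intro h
  · have := UInt32.lt_iff_toNat_lt.mp h
    simp only [Char.toNat] at *
    omega
  · apply UInt32.lt_iff_toNat_lt.mpr
    simp only [Char.toNat] at *
    omega

-- strict chains
theorem chain_up (f : Nat → Int) (a b : Nat) (h : ∀ i, a ≤ i → i < b → f i < f (i + 1))
    (hab : a < b) : f a < f b := by
  induction b with
  | zero => omega
  | succ b ih =>
    rcases Nat.lt_or_ge a b with h' | h'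
    · exact lt_trans (ih (fun i h1 h2 => h i h1 (by omega)) h') (h b (by omega) (by omega))
    · have : a = b := by omega
      subst this; exact h a le_rfl (by omega)

theorem chain_down (f : Nat → Int) (a b : Nat) (h : ∀ i, a ≤ i → i + 1 ≤ b → f (i + 1) < f i)
    (hab : a < b) : f b < f a := by
  induction b with
  | zero => omega
  | succ b ih =>
    rcases Nat.lt_or_ge a b with h' | h'
    · exact lt_trans (h b (by omega) le_rfl) (ih (fun i h1 h2 => h i h1 (by omega)) h')
    · have : a = b := by omega
      subst this; exact h a le_rfl le_rfl

def pvFoldM (cs : List Char) (m : Nat) : Int × Nat :=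
  (List.range m).foldl
    (fun mv i => if mv.1 < pvIntChar (cs.getD i ' ') then (pvIntChar (cs.getD i ' '), i) else mv)
    (0, 0)

theorem maxloop_inv (cs : List Char) (hdig : ∀ c ∈ cs, PySem.Chars.isdigit c = true)
    (m : Nat) (hm : 1 ≤ m) (hmL : m ≤ cs.length) :
    (pvFoldM cs m).2 < m ∧ pvIntChar (cs.getD (pvFoldM cs m).2 ' ') = (pvFoldM cs m).1 ∧
      (∀ k < m, pvIntChar (cs.getD k ' ') ≤ (pvFoldM cs m).1) ∧
      (∀ k < (pvFoldM cs m).2, pvIntChar (cs.getD k ' ') < (pvFoldM cs m).1) := by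
  induction m with
  | zero => omega
  | succ m ih =>
    have hstep : pvFoldM cs (m + 1) =
        (if (pvFoldM cs m).1 < pvIntChar (cs.getD m ' ')
          then (pvIntChar (cs.getD m ' '), m) else pvFoldM cs m) := by
      show (List.range (m+1)).foldl _ _ = _
      rw [List.range_succ, List.foldl_append]
      rfl
    rcases Nat.eq_or_lt_of_le hm with h1 | h1
    · -- m = 0
      have hm0 : m = 0 := by omega
      subst hm0
      have hd0 : PySem.Chars.isdigit (cs.getD 0 ' ') = true :=
        hdig _ (by rw [List.getD_eq_getElem _ _ (by omega)]; exact List.getElem_mem _)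
      have hnn := pvIntChar_nonneg _ hd0
      have h00 : pvFoldM cs 0 = (0, 0) := rfl
      rw [hstep, h00]
      split
      · refine ⟨by omega, rfl, ?_, by omega⟩
        intro k hk
        have : k = 0 := by omega
        subst this; exact le_rfl
      · rename_i hle
        refine ⟨Nat.zero_lt_one, le_antisymm (not_lt.mp hle) hnn, ?_,
          fun k hk => (Nat.not_lt_zero k hk).elim⟩
        intro k hk
        have : k = 0 := by omega
        subst this
        exact not_lt.mp hle
    · have ih' := ih (by omega) (by omega)
      obtain ⟨i1, i2, i3, i4⟩ := ih'
      rw [hstep]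
      split
      · rename_i hlt
        refine ⟨by omega, rfl, ?_, ?_⟩
        · intro k hk
          rcases Nat.lt_or_ge k m with h' | h'
          · exact le_of_lt (lt_of_le_of_lt (i3 k h') hlt)
          · have : k = m := by omega
            subst this; exact le_rfl
        · intro k hk
          exact lt_of_le_of_lt (i3 k (by omega)) hlt
      · rename_i hge
        refine ⟨by omega, i2, ?_, i4⟩
        intro k hk
        rcases Nat.lt_or_ge k m with h' | h'
        · exact i3 k h'
        · have : k = m := by omega
          subst this; omega
theorem walk_spec (d : List Int) (cmp : Int → Int → Bool) (i : Nat) :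
    i ≤ pvWalk d i cmp ∧
    (∀ k, i ≤ k → k < pvWalk d i cmp → cmp (d.getD k 0) (d.getD (k + 1) 0) = true) ∧
    (pvWalk d i cmp + 1 < d.length → cmp (d.getD (pvWalk d i cmp) 0) (d.getD (pvWalk d i cmp + 1) 0) = false) ∧
    (i < d.length → pvWalk d i cmp < d.length) := by
  fun_induction pvWalk d i cmp with
  | case1 i hlt hc ih =>
    obtain ⟨j1, j2, j3, j4⟩ := ih
    refine ⟨by omega, ?_, j3, fun _ => j4 (by omega)⟩
    intro k hk1 hk2
    rcases Nat.eq_or_lt_of_le hk1 with h' | h'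
    · subst h'; exact hc
    · exact j2 k (by omega) hk2
  | case2 i hlt hc =>
    refine ⟨le_rfl, fun k h1 h2 => by omega, fun _ => by simpa using hc, fun h => by omega⟩
  | case3 i hge =>
    exact ⟨le_rfl, fun k h1 h2 => by omega, fun h => by omega, fun h => by omega⟩
def Mnt (cs : List Char) : Prop :=
  ∃ p, p < cs.length ∧
    (∀ i < p, pvIntChar (cs.getD i ' ') < pvIntChar (cs.getD (i + 1) ' ')) ∧
    (∀ i, p ≤ i → i + 1 < cs.length → pvIntChar (cs.getD (i + 1) ' ') < pvIntChar (cs.getD i ' '))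

theorem dig_idx (cs : List Char) (hdig : ∀ c ∈ cs, PySem.Chars.isdigit c = true)
    (i : Nat) (hi : i < cs.length) : PySem.Chars.isdigit (cs.getD i ' ') = true :=
  hdig _ (by rw [List.getD_eq_getElem _ _ hi]; exact List.getElem_mem _)

theorem lt_idx (cs : List Char) (hdig : ∀ c ∈ cs, PySem.Chars.isdigit c = true)
    (i j : Nat) (hi : i < cs.length) (hj : j < cs.length) :
    cs.getD i ' ' < cs.getD j ' ' ↔ pvIntChar (cs.getD i ' ') < pvIntChar (cs.getD j ' ') :=
  char_lt_iff _ _ (dig_idx cs hdig i hi) (dig_idx cs hdig j hj)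

theorem pvMaxLoop_eq (cs : List Char) : pvMaxLoop cs = pvFoldM cs cs.length := rfl
theorem A_iff (n : String) (hdig : ∀ c ∈ n.toList, PySem.Chars.isdigit c = true)
    (hL : 2 ≤ n.toList.length) : check n = 1 ↔ Mnt n.toList := by
  set cs := n.toList with hcs
  have h2 : ¬ cs.length < 2 := by omega
  obtain ⟨i1, i2, i3, i4⟩ := maxloop_inv cs hdig cs.length (by omega) le_rfl
  have hck : check n =
      (if (List.range (pvFoldM cs cs.length).2).all
          (fun i => decide (cs.getD i ' ' < cs.getD (i + 1) ' ')) then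
        if (List.range' (pvFoldM cs cs.length).2 (cs.length - 1 - (pvFoldM cs cs.length).2)).all
            (fun i => decide (cs.getD (i + 1) ' ' < cs.getD i ' ')) then 1
        else 0
      else 0) := by
    simp only [check, pvMaxLoop_eq, ← hcs, if_neg h2]
  set p := (pvFoldM cs cs.length).2 with hp
  constructor
  · intro h1
    rw [hck] at h1
    split at h1
    · rename_i c1
      split at h1
      · rename_i c2
        simp only [List.all_eq_true, List.mem_range, List.mem_range'_1, decide_eq_true_eq] at c1 c2
        refine ⟨p, i1, ?_, ?_⟩
        · intro i hi
          exact (lt_idx cs hdig i (i + 1) (by omega) (by omega)).mp (c1 i hi)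
        · intro i hi1 hi2
          exact (lt_idx cs hdig (i + 1) i (by omega) (by omega)).mp (c2 i ⟨hi1, by omega⟩)
      · exact absurd h1 (by norm_num)
    · exact absurd h1 (by norm_num)
  · rintro ⟨q, hq, hup, hdown⟩
    have hpq : p = q := by
      by_contra hne
      have hqmax : ∀ k, k < cs.length → k ≠ q → pvIntChar (cs.getD k ' ') < pvIntChar (cs.getD q ' ') := by
        intro k hk hkq
        rcases Nat.lt_or_ge k q with h' | h'
        · exact chain_up (fun j => pvIntChar (cs.getD j ' ')) k q
            (fun i hi1 hi2 => hup i hi2) h'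
        · have h'' : q < k := by omega
          exact chain_down (fun j => pvIntChar (cs.getD j ' ')) q k
            (fun i hi1 hi2 => hdown i hi1 (by omega)) h''
      have hlt : pvIntChar (cs.getD p ' ') < pvIntChar (cs.getD q ' ') := hqmax p i1 hne
      have hle : pvIntChar (cs.getD q ' ') ≤ pvIntChar (cs.getD p ' ') := by
        rw [i2]; exact i3 q hq
      omega
    rw [hck]
    rw [if_pos, if_pos]
    · simp only [List.all_eq_true, List.mem_range'_1, decide_eq_true_eq]
      intro i hi
      rw [hpq] at hi
      exact (lt_idx cs hdig (i + 1) i (by omega) (by omega)).mpr (hdown i hi.1 (by omega))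
    · simp only [List.all_eq_true, List.mem_range, decide_eq_true_eq]
      intro i hi
      rw [hpq] at hi
      exact (lt_idx cs hdig i (i + 1) (by omega) (by omega)).mpr (hup i hi)

theorem B_iff (n : String) (hL : 2 ≤ n.toList.length) : check_alt n = 1 ↔ Mnt n.toList := by
  set cs := n.toList with hcs
  have h2 : ¬ cs.length < 2 := by omega
  set d := cs.map pvIntChar with hd
  have hdl : d.length = cs.length := by rw [hd, List.length_map]
  have hdk : ∀ k, k < cs.length → d.getD k 0 = pvIntChar (cs.getD k ' ') := by
    intro k hk
    rw [List.getD_eq_getElem _ _ (by omega), List.getD_eq_getElem _ _ hk]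
    simp [hd]
  obtain ⟨a1, a2, a3, a4⟩ := walk_spec d (fun x y => decide (x < y)) 0
  set w1 := pvWalk d 0 (fun x y => decide (x < y)) with hw1
  obtain ⟨b1, b2, b3, b4⟩ := walk_spec d (fun x y => decide (y < x)) w1
  set w2 := pvWalk d w1 (fun x y => decide (y < x)) with hw2
  have hw1L : w1 < cs.length := by rw [← hdl]; exact a4 (by omega)
  have hw2L : w2 < cs.length := by rw [← hdl]; exact b4 (by rw [hdl]; omega)
  have hck : check_alt n = (if w2 = d.length - 1 then 1 else 0) := by
    simp only [check_alt, ← hcs, if_neg h2, ← hd, ← hw1, ← hw2]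
  constructor
  · intro h1
    rw [hck] at h1
    split at h1
    · rename_i hend
      refine ⟨w1, hw1L, ?_, ?_⟩
      · intro i hi
        have := a2 i (by omega) hi
        rw [hdk i (by omega), hdk (i + 1) (by omega)] at this
        simpa using this
      · intro i hi1 hi2
        have hi2' : i < w2 := by omega
        have := b2 i hi1 hi2'
        rw [hdk i (by omega), hdk (i + 1) (by omega)] at this
        simpa using this
    · exact absurd h1 (by norm_num)
  · rintro ⟨q, hq, hup, hdown⟩
    have hq1 : w1 = q := by
      rcases Nat.lt_trichotomy w1 q with h' | h' | h'
      · exfalso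
        have hstop := a3 (by omega)
        have hcontra := hup w1 h'
        rw [← hdk w1 (by omega), ← hdk (w1 + 1) (by omega)] at hcontra
        exact of_decide_eq_false hstop hcontra
      · exact h'
      · exfalso
        have hk := of_decide_eq_true (a2 q (by omega) h')
        rw [hdk q (by omega), hdk (q + 1) (by omega)] at hk
        have hcontra := hdown q le_rfl (by omega)
        omega
    have hq2 : w2 = cs.length - 1 := by
      by_contra hne
      have hlt : w2 + 1 < d.length := by rw [hdl]; omega
      have hstop := b3 hlt
      have hcontra := hdown w2 (by omega) (by omega)
      rw [← hdk w2 (by omega), ← hdk (w2 + 1) (by omega)] at hcontra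
      exact of_decide_eq_false hstop hcontra
    rw [hck, if_pos (by omega)]

theorem A01 (n : String) : check n = 0 ∨ check n = 1 := by
  simp only [check]
  split_ifs <;> simp

theorem B01 (n : String) : check_alt n = 0 ∨ check_alt n = 1 := by
  simp only [check_alt]
  split_ifs <;> simp

theorem main_eq (n : String) (hpre : n.toList.length < 2 ∨ n.toList.all PySem.Chars.isdigit = true) :
    check n = check_alt n := by
  by_cases h2 : n.toList.length < 2
  · simp only [check, check_alt, if_pos h2]
  · have hdig : ∀ c ∈ n.toList, PySem.Chars.isdigit c = true := by
      rcases hpre with h | h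
      · omega
      · exact fun c hc => List.all_eq_true.mp h c hc
    have hL : 2 ≤ n.toList.length := by omega
    rcases A01 n with hA | hA <;> rcases B01 n with hB | hB
    · rw [hA, hB]
    · exfalso
      have := (A_iff n hdig hL).mpr ((B_iff n hL).mp hB)
      omega
    · exfalso
      have := (B_iff n hL).mpr ((A_iff n hdig hL).mp hA)
      omega
    · rw [hA, hB]

-- ===== VERDICT (by name: the statement is the Claim_ definition above) =====
theorem check_spec : Claim_equal_check := by
  intro n _ hpre
  unfold Spec_check
  exact main_eq n hpre
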